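-- pv_equiv track=rewrite | github.com/kentonium3/bake-tracker | scripts/migrate_opml_taxonomy.py | find_id_gaps
-- ===== SOURCE A (Python) =====
-- def find_id_gaps(ingredients: list) -> list:
--     """Find gaps in the ID sequence."""
--     ids = sorted([ing["existing_id"] for ing in ingredients if ing["existing_id"] is not None])
--     if not ids:
--         return []
--
--     gaps = []
--     for i in range(len(ids) - 1):
--         if ids[i+1] - ids[i] > 1:
--             gaps.append({
--                 "after_id": ids[i],
--                 "before_id": ids[i+1],
--                 "gap_size": ids[i+1] - ids[i] - 1
--             })
--
--     return gaps
-- ===== SOURCE B (Python) =====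
-- def find_id_gaps(ingredients: list) -> list:
--     """Find gaps in the ID sequence."""
--     present = {ing["existing_id"] for ing in ingredients
--                if ing["existing_id"] is not None}
--     if not present:
--         return []
--     hi = max(present)
--     gap_starts = sorted(a for a in present if a < hi and a + 1 not in present)
--     gaps = []
--     for a in gap_starts:
--         b = min(x for x in present if x > a)
--         gaps.append({"after_id": a, "before_id": b, "gap_size": b - a - 1})
--     return gaps
-- ===== Notes on version B (the rewrite author's own statement) =====
-- stated objective: alternative
-- what changed: Instead of sorting all ids and comparing adjacent elements, B builds a presence set, detects gap starts by the membership test 'a+1 not in present' (for a below the maximum), sorts only those starts, and recovers each gap's right endpoint as the minimum present id greater than the start.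
import Mathlib
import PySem

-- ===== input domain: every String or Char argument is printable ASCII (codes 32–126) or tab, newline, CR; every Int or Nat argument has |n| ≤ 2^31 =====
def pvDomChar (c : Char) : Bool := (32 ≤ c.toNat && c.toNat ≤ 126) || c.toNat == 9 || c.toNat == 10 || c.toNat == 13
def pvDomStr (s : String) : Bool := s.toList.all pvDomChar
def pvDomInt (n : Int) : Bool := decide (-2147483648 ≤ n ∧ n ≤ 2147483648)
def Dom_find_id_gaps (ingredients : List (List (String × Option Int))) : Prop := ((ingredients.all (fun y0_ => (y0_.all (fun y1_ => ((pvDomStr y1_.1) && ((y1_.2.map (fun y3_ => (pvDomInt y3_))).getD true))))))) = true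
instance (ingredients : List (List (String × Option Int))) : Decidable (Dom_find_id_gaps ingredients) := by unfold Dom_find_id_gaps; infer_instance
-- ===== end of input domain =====

-- B replaces A's sort-and-compare-adjacent scan by a presence set: gap starts are found
-- by the membership test 'a+1 not in present', and each gap's right endpoint is the
-- minimum present id greater than the start; objective: alternative algorithm, same result.

-- ===== PORT A =====
-- ing["existing_id"] is a dict lookup (first match on the association list); a missing
-- key raises KeyError in Python — excluded by Pre_ below, ported as Option.bind.
def pvExtract (ingredients : List (List (String × Option Int))) : List Int :=
  ingredients.filterMap (fun ing => (List.lookup "existing_id" ing).bind id)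

def pvGapRow (a b : Int) : List (String × Int) :=
  [("after_id", a), ("before_id", b), ("gap_size", b - a - 1)]

def find_id_gaps (ingredients : List (List (String × Option Int))) : List (List (String × Int)) :=
  let ids := PySem.List.sorted (pvExtract ingredients) (fun x => x)
  if ids = [] then []
  else
    (PySem.List.pyRange 0 ((ids.length : Int) - 1) 1).foldl
      (fun gaps i =>
        if PySem.List.pyGetD ids (i + 1) 0 - PySem.List.pyGetD ids i 0 > 1 then
          gaps ++ [pvGapRow (PySem.List.pyGetD ids i 0) (PySem.List.pyGetD ids (i + 1) 0)]
        else gaps)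
      []

-- ===== PORT B =====
-- max(present) and min(generator) iterate a Python set without a key: order-independent,
-- ported with PySem.List.max?/min?. Both are applied to provably nonempty lists
-- (present ≠ [], and for a gap start a < hi the filter contains hi), so .getD 0 is
-- never the default.
def find_id_gaps_alt (ingredients : List (List (String × Option Int))) : List (List (String × Int)) :=
  let present : PySem.Set Int := PySem.Set.ofList (pvExtract ingredients)
  if present = [] then []
  else
    let hi := (PySem.List.max? present (fun x => x)).getD 0
    let starts := PySem.List.sorted
      (present.filter (fun a => decide (a < hi) && !(PySem.Set.contains present (a + 1))))
      (fun x => x)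
    starts.foldl
      (fun gaps a =>
        gaps ++
          [pvGapRow a
            ((PySem.List.min? (present.filter (fun x => decide (a < x))) (fun x => x)).getD 0)])
      []

-- ===== PRECONDITION & SPEC =====
-- Pre_ excludes exactly the inputs where some ingredient dict lacks the "existing_id"
-- key, on which the Python A raises KeyError.
def Pre_find_id_gaps (ingredients : List (List (String × Option Int))) : Prop :=
  ∀ ing ∈ ingredients, (List.lookup "existing_id" ing).isSome = true
instance (ingredients : List (List (String × Option Int))) : Decidable (Pre_find_id_gaps ingredients) := by unfold Pre_find_id_gaps; infer_instance

def pvWitness_find_id_gaps : (List (List (String × Option Int))) :=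
  [[("existing_id", some 1)], [("existing_id", some 4)], [("existing_id", none)]]

def Spec_find_id_gaps (ingredients : List (List (String × Option Int))) (out : List (List (String × Int))) : Prop := out = find_id_gaps_alt ingredients
instance (ingredients : List (List (String × Option Int))) (out : List (List (String × Int))) : Decidable (Spec_find_id_gaps ingredients out) := by unfold Spec_find_id_gaps; infer_instance

-- ===== CLAIM (what is proved, stated in full; the proofs are below) =====
def Claim_equal_find_id_gaps : Prop := ∀ (ingredients : List (List (String × Option Int))), Dom_find_id_gaps ingredients → Pre_find_id_gaps ingredients → Spec_find_id_gaps ingredients (find_id_gaps ingredients)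

-- ===== LEMMAS AND PROOFS =====

-- the gap rows read off adjacent pairs of a list
def pvGaps (l : List Int) : List (List (String × Int)) :=
  ((l.zip l.tail).filter (fun p => decide (p.2 - p.1 > 1))).map (fun p => pvGapRow p.1 p.2)

-- adjacent-duplicate removal
def pvAdedup : List Int → List Int
  | [] => []
  | [a] => [a]
  | a :: b :: t => if a = b then pvAdedup (b :: t) else a :: pvAdedup (b :: t)

lemma pvAdedup_cons_head (b : Int) (t : List Int) : ∃ t', pvAdedup (b :: t) = b :: t' := by
  induction t generalizing b with
  | nil => exact ⟨[], rfl⟩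
  | cons c t ih =>
    by_cases h : b = c
    · subst h
      obtain ⟨t', ht⟩ := ih b
      exact ⟨t', by simpa [pvAdedup] using ht⟩
    · exact ⟨pvAdedup (c :: t), by simp [pvAdedup, h]⟩

lemma pvMem_adedup (l : List Int) (x : Int) : x ∈ pvAdedup l ↔ x ∈ l := by
  induction l with
  | nil => simp [pvAdedup]
  | cons a t ih =>
    cases t with
    | nil => simp [pvAdedup]
    | cons b t =>
      by_cases h : a = b
      · subst h; simp [pvAdedup] at ih ⊢; tauto
      · simp [pvAdedup, h] at ih ⊢; tauto

lemma pvAdedup_pairwise_lt (l : List Int) (h : l.Pairwise (· ≤ ·)) :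
    (pvAdedup l).Pairwise (· < ·) := by
  induction l with
  | nil => simp [pvAdedup]
  | cons a t ih =>
    cases t with
    | nil => simp [pvAdedup]
    | cons b t =>
      rcases List.pairwise_cons.mp h with ⟨ha, hbt⟩
      by_cases hab : a = b
      · simpa [pvAdedup, hab] using ih hbt
      · rw [pvAdedup, if_neg hab]
        refine List.pairwise_cons.mpr ⟨?_, ih hbt⟩
        intro x hx
        rw [pvMem_adedup] at hx
        rcases List.mem_cons.mp hx with rfl | hx
        · exact lt_of_le_of_ne (ha _ (by simp)) hab
        · exact lt_of_lt_of_le (lt_of_le_of_ne (ha _ (by simp)) hab)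
            ((List.pairwise_cons.mp hbt).1 _ hx)

-- adjacent duplicates contribute no gap row
lemma pvGaps_adedup (l : List Int) : pvGaps l = pvGaps (pvAdedup l) := by
  induction l with
  | nil => rfl
  | cons a t ih =>
    cases t with
    | nil => rfl
    | cons b t =>
      by_cases hab : a = b
      · subst hab
        rw [pvAdedup, if_pos rfl, ← ih]
        simp [pvGaps]
      · rw [pvAdedup, if_neg hab]
        obtain ⟨t', ht⟩ := pvAdedup_cons_head b t
        rw [ht] at ih ⊢
        simp only [pvGaps, List.zip_cons_cons, List.tail_cons, List.filter_cons] at ih ⊢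
        by_cases hgap : b - a > 1 <;> simp [hgap, ih]

-- index k ↦ adjacent pair (l[k], l[k+1]) enumerates zip l l.tail
lemma pvRange_pairs (l : List Int) :
    (List.range (l.length - 1)).map (fun k => (l.getD k 0, l.getD (k + 1) 0)) = l.zip l.tail := by
  induction l with
  | nil => rfl
  | cons a t ih =>
    cases t with
    | nil => rfl
    | cons b t =>
      simp only [List.length_cons, Nat.add_sub_cancel] at ih ⊢
      rw [List.range_succ_eq_map]
      simp only [List.map_cons, List.map_map, List.zip_cons_cons, List.tail_cons] at ih ⊢
      refine congrArg (_ :: ·) ?_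
      rw [← ih]
      exact List.map_congr_left (fun k _ => rfl)

-- A's fold over range(len(ids)-1), rewritten to the pair form
lemma pvFold_eq_gaps (l : List Int) :
    (PySem.List.pyRange 0 ((l.length : Int) - 1) 1).foldl
      (fun gaps i =>
        if PySem.List.pyGetD l (i + 1) 0 - PySem.List.pyGetD l i 0 > 1 then
          gaps ++ [pvGapRow (PySem.List.pyGetD l i 0) (PySem.List.pyGetD l (i + 1) 0)]
        else gaps)
      [] = pvGaps l := by
  have hfun : (fun (gaps : List (List (String × Int))) (i : Int) =>
        if PySem.List.pyGetD l (i + 1) 0 - PySem.List.pyGetD l i 0 > 1 then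
          gaps ++ [pvGapRow (PySem.List.pyGetD l i 0) (PySem.List.pyGetD l (i + 1) 0)]
        else gaps)
      = (fun gaps i =>
        if decide (PySem.List.pyGetD l (i + 1) 0 - PySem.List.pyGetD l i 0 > 1) = true then
          gaps ++ [pvGapRow (PySem.List.pyGetD l i 0) (PySem.List.pyGetD l (i + 1) 0)]
        else gaps) := by
    funext gaps i
    simp only [decide_eq_true_eq]
  rw [hfun]
  rw [PySem.List.foldl_append_if
      (fun i => decide (PySem.List.pyGetD l (i + 1) 0 - PySem.List.pyGetD l i 0 > 1))
      (fun i => pvGapRow (PySem.List.pyGetD l i 0) (PySem.List.pyGetD l (i + 1) 0))]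
  rw [PySem.List.pyRange_one]
  have hcast : ((l.length : Int) - 1 - 0).toNat = l.length - 1 := by omega
  rw [hcast, List.filter_map, List.map_map]
  have hfun : ∀ (k : Nat),
      ((fun i => pvGapRow (PySem.List.pyGetD l i 0) (PySem.List.pyGetD l (i + 1) 0)) ∘
        (fun k : Nat => (0 : Int) + ↑k)) k
        = (fun k : Nat => pvGapRow (l.getD k 0) (l.getD (k + 1) 0)) k := by
    intro k
    simp only [Function.comp, zero_add]
    have h1 : ((k : Int) + 1) = ((k + 1 : Nat) : Int) := by push_cast; ring
    rw [h1, PySem.List.pyGetD_natCast, PySem.List.pyGetD_natCast]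
  have hpred : ∀ (k : Nat),
      ((fun i => decide (PySem.List.pyGetD l (i + 1) 0 - PySem.List.pyGetD l i 0 > 1)) ∘
        (fun k : Nat => (0 : Int) + ↑k)) k
        = (fun k : Nat => decide (l.getD (k + 1) 0 - l.getD k 0 > 1)) k := by
    intro k
    simp only [Function.comp, zero_add]
    have h1 : ((k : Int) + 1) = ((k + 1 : Nat) : Int) := by push_cast; ring
    rw [h1, PySem.List.pyGetD_natCast, PySem.List.pyGetD_natCast]
  rw [List.map_congr_left (fun k _ => hfun k), List.filter_congr (fun k _ => hpred k)]
  unfold pvGaps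
  rw [← pvRange_pairs l, List.filter_map, List.map_map]
  rfl

-- the sorted distinct ids are exactly the adjacent-deduplication of the sorted ids
lemma pvSorted_set_eq_adedup (xs : List Int) :
    PySem.List.sorted (PySem.Set.ofList xs) (fun x => x)
      = pvAdedup (PySem.List.sorted xs (fun x => x)) := by
  apply PySem.List.sorted_eq_of_perm_of_pairwise_lt
  · rw [List.perm_ext_iff_of_nodup]
    · intro a
      rw [pvMem_adedup, PySem.List.mem_sorted, PySem.Set.mem_ofList]
    · exact (pvAdedup_pairwise_lt _ (PySem.List.sorted_pairwise xs (fun x => x))).nodup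
    · exact PySem.Set.nodup_ofList xs
  · exact pvAdedup_pairwise_lt _ (PySem.List.sorted_pairwise xs (fun x => x))

-- min with identity key depends only on the multiset of elements
lemma pvMin_perm (l1 l2 : List Int) (h : l1.Perm l2) :
    PySem.List.min? l1 (fun x => x) = PySem.List.min? l2 (fun x => x) := by
  cases h1 : PySem.List.min? l1 (fun x => x) with
  | none =>
    rw [PySem.List.min?_eq_none_iff] at h1
    subst h1
    rw [List.nil_perm] at h
    subst h
    rfl
  | some m =>
    cases h2 : PySem.List.min? l2 (fun x => x) with
    | none =>
      rw [PySem.List.min?_eq_none_iff] at h2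
      subst h2
      rw [List.perm_nil] at h
      subst h
      simp [PySem.List.min?] at h1
    | some m' =>
      have hm := PySem.List.min?_mem h1
      have hm' := PySem.List.min?_mem h2
      have h1' := PySem.List.min?_isMin h1
      have h2' := PySem.List.min?_isMin h2
      have := h1' m' (h.symm.subset hm')
      have := h2' m (h.subset hm)
      simp only [Option.some.injEq]
      omega

-- min of a sorted-strictly-increasing list is its head
lemma pvMin_of_sorted_head (b : Int) (t : List Int) (h : ∀ x ∈ t, b ≤ x) :
    PySem.List.min? (b :: t) (fun x => x) = some b := by
  rw [PySem.List.min?_id_cons]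
  congr 1
  induction t generalizing b with
  | nil => rfl
  | cons c t ih =>
    have hbc : b ≤ c := h c (by simp)
    simp only [List.foldl_cons, min_eq_left hbc]
    exact ih b (fun x hx => h x (by simp [hx]))

-- core: on a strictly increasing list, the gap rows are exactly the filtered starts
-- with the minimum-greater element as right endpoint
lemma pvGaps_eq_scan (s : List Int) (hs : s.Pairwise (· < ·)) (hi : Int)
    (hmem : hi ∈ s) (hmax : ∀ x ∈ s, x ≤ hi) :
    (s.filter (fun a => decide (a < hi) && !(s.contains (a + 1)))).map
      (fun a => pvGapRow a
        ((PySem.List.min? (s.filter (fun x => decide (a < x))) (fun x => x)).getD 0))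
      = pvGaps s := by
  induction s with
  | nil => cases hmem
  | cons a t ih =>
    rcases List.pairwise_cons.mp hs with ⟨ha, ht⟩
    cases t with
    | nil =>
      have : hi = a := by rcases List.mem_singleton.mp hmem with h; exact h.symm ▸ rfl
      subst this
      simp [pvGaps]
    | cons b t' =>
      have hab : a < b := ha b (by simp)
      have hble : ∀ x ∈ b :: t', b ≤ x := by
        intro x hx
        rcases List.mem_cons.mp hx with rfl | hx
        · exact le_refl _
        · exact le_of_lt ((List.pairwise_cons.mp ht).1 x hx)
      have hhit : hi ∈ b :: t' := by
        rcases List.mem_cons.mp hmem with rfl | h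
        · exact absurd (hmax b (by simp)) (by omega)
        · exact h
      have hahi : a < hi := lt_of_lt_of_le hab (hble hi hhit)
      have hgt : ∀ x ∈ b :: t', a < x := fun x hx => lt_of_lt_of_le hab (hble x hx)
      -- head filter condition: a + 1 ∈ a :: b :: t' ↔ b = a + 1
      have hmemsucc : (a + 1 ∈ a :: b :: t') ↔ b = a + 1 := by
        constructor
        · intro h
          rcases List.mem_cons.mp h with h | h
          · omega
          · rcases List.mem_cons.mp h with h | h
            · omega
            · have := (List.pairwise_cons.mp ht).1 _ h
              have := hgt _ (List.mem_cons_of_mem b h)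
              omega
        · intro h; simp [h]
      -- the min-greater filter at the head keeps exactly the tail
      have hfilt : (a :: b :: t').filter (fun x => decide (a < x)) = b :: t' := by
        rw [List.filter_cons_of_neg (by simp)]
        exact List.filter_eq_self.mpr (fun x hx => by simpa using hgt x hx)
      -- tail predicates agree with head predicates on tail elements
      have hcongr : ∀ a' ∈ b :: t',
          ((fun a' => decide (a' < hi) && !((a :: b :: t').contains (a' + 1))) a'
            = (fun a' => decide (a' < hi) && !((b :: t').contains (a' + 1))) a') := by
        intro a' ha'
        have hne : ¬ (a' + 1 = a) := by
          have := hgt a' ha'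
          omega
        simp [hne]
      have htail := ih ht hhit (fun x hx => hmax x (List.mem_cons_of_mem a hx))
      -- tail min filters: filtering the full list equals filtering the tail for a' in tail
      have hminagree : ∀ a' ∈ (b :: t').filter
            (fun x => decide (x < hi) && !((b :: t').contains (x + 1))),
          (fun y => pvGapRow y
              ((PySem.List.min? ((a :: b :: t').filter (fun x => decide (y < x))) (fun x => x)).getD 0)) a'
            = (fun y => pvGapRow y
              ((PySem.List.min? ((b :: t').filter (fun x => decide (y < x))) (fun x => x)).getD 0)) a' := by
        intro a' ha'
        have ha'mem : a' ∈ b :: t' := (List.mem_filter.mp ha').1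
        have haa' : a < a' := hgt a' ha'mem
        have heq : (a :: b :: t').filter (fun x => decide (a' < x))
            = (b :: t').filter (fun x => decide (a' < x)) := by
          rw [List.filter_cons_of_neg (by simp; omega)]
        dsimp only
        rw [heq]
      -- unfold one step of both sides
      by_cases hgap : b = a + 1
      · -- no gap at the head
        have hc : ((a :: b :: t').contains (a + 1)) = true :=
          List.contains_iff_mem.mpr (hmemsucc.mpr hgap)
        have hcond : (decide (a < hi) && !((a :: b :: t').contains (a + 1))) = false := by
          rw [hc]; simp
        have hfe := List.filter_cons_of_neg
          (p := fun a' => decide (a' < hi) && !((a :: b :: t').contains (a' + 1)))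
          (a := a) (l := b :: t')
          (fun h => Bool.false_ne_true (hcond.symm.trans h))
        rw [hfe, List.filter_congr hcongr, List.map_congr_left hminagree, htail]
        simp only [pvGaps, List.zip_cons_cons, List.tail_cons, List.filter_cons]
        have : ¬ (b - a > 1) := by omega
        simp [this]
      · -- gap at the head
        have hc : ((a :: b :: t').contains (a + 1)) = false :=
          Bool.eq_false_iff.mpr (fun h => (fun hm => hgap (hmemsucc.mp hm)) (List.contains_iff_mem.mp h))
        have hcond : (decide (a < hi) && !((a :: b :: t').contains (a + 1))) = true := by
          rw [hc]; simp [hahi]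
        have hfe := List.filter_cons_of_pos
          (p := fun a' => decide (a' < hi) && !((a :: b :: t').contains (a' + 1)))
          (a := a) (l := b :: t') hcond
        rw [hfe, List.map_cons]
        rw [hfilt, pvMin_of_sorted_head b t' (fun x hx => hble x (List.mem_cons_of_mem b hx))]
        rw [List.filter_congr hcongr, List.map_congr_left hminagree, htail]
        simp only [pvGaps, List.zip_cons_cons, List.tail_cons, List.filter_cons]
        have : b - a > 1 := by
          have := hgt b (by simp); omega
        simp [this, pvGapRow]

-- bridges between the unsorted presence set and its sorted form
lemma pvSortFilter (xs : List Int) (p : Int → Bool) :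
    PySem.List.sorted ((PySem.Set.ofList xs).filter p) (fun x => x)
      = (PySem.List.sorted (PySem.Set.ofList xs) (fun x => x)).filter p := by
  apply PySem.List.sorted_eq_of_perm_of_pairwise_lt
  · exact (PySem.List.sorted_perm _ _ _).filter p
  · exact (PySem.List.sorted_ofList_pairwise_lt xs).filter p

lemma pvMinFilter (xs : List Int) (p : Int → Bool) :
    PySem.List.min? ((PySem.Set.ofList xs).filter p) (fun x => x)
      = PySem.List.min? ((PySem.List.sorted (PySem.Set.ofList xs) (fun x => x)).filter p)
          (fun x => x) :=
  pvMin_perm _ _ (((PySem.List.sorted_perm _ _ _).filter p).symm)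

lemma pvContainsSorted (xs : List Int) (y : Int) :
    List.contains (PySem.Set.ofList xs) y
      = List.contains (PySem.List.sorted (PySem.Set.ofList xs) (fun x => x)) y := by
  by_cases hm : y ∈ PySem.Set.ofList xs
  · rw [List.contains_iff_mem.mpr hm,
        List.contains_iff_mem.mpr ((PySem.List.sorted_perm _ _ _).mem_iff.mpr hm)]
  · rw [Bool.eq_false_iff.mpr (fun h => hm (List.contains_iff_mem.mp h)),
        Bool.eq_false_iff.mpr
          (fun h => hm ((PySem.List.sorted_perm _ _ _).mem_iff.mp (List.contains_iff_mem.mp h)))]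

-- ===== VERDICT (by name: the statement is the Claim_ definition above) =====
theorem find_id_gaps_spec : Claim_equal_find_id_gaps := by
  intro ingredients _ _
  unfold Spec_find_id_gaps find_id_gaps find_id_gaps_alt
  by_cases hnil : PySem.Set.ofList (pvExtract ingredients) = []
  · have hxsnil : pvExtract ingredients = [] := by
      cases hx : pvExtract ingredients with
      | nil => rfl
      | cons x t =>
        have hmem : x ∈ PySem.Set.ofList (pvExtract ingredients) := by
          rw [PySem.Set.mem_ofList, hx]; simp
        rw [hnil] at hmem
        cases hmem
    rw [if_pos (by rw [PySem.List.sorted_eq_nil_iff]; exact hxsnil), if_pos hnil]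
  · rw [if_neg hnil]
    have hsallne : PySem.List.sorted (pvExtract ingredients) (fun x => x) ≠ [] := by
      intro h
      apply hnil
      rw [PySem.List.sorted_eq_nil_iff] at h
      simp [h, PySem.Set.ofList]
    rw [if_neg hsallne, pvFold_eq_gaps, pvGaps_adedup, ← pvSorted_set_eq_adedup]
    obtain ⟨hi, hhi⟩ : ∃ hi,
        PySem.List.max? (PySem.Set.ofList (pvExtract ingredients)) (fun x => x) = some hi := by
      cases h : PySem.List.max? (PySem.Set.ofList (pvExtract ingredients)) (fun x => x) with
      | none => exact absurd ((PySem.List.max?_eq_none_iff _ _).mp h) hnil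
      | some m => exact ⟨m, rfl⟩
    rw [hhi]
    simp only [Option.getD_some, PySem.Set.contains]
    rw [PySem.List.foldl_append_singleton_eq_map, pvSortFilter]
    simp only [pvMinFilter, pvContainsSorted]
    exact (pvGaps_eq_scan _ (PySem.List.sorted_ofList_pairwise_lt _) hi
      ((PySem.List.sorted_perm _ _ _).mem_iff.mpr (PySem.List.max?_mem hhi))
      (fun x hx => PySem.List.max?_isMax hhi x ((PySem.List.sorted_perm _ _ _).subset hx))).symm
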